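-- pv_equiv track=rewrite | github.com/Vishaldo-Projects/Brochure-Generator | brochure_generator.py | _categorize_image
-- ===== SOURCE A (Python) =====
-- def _categorize_image(url, alt_text, img_element):
--     """Categorize image type for better content matching"""
--     url_lower = url.lower()
--     alt_lower = alt_text.lower()
--
--     # Check for different image categories
--     if any(term in url_lower or term in alt_lower for term in ['product', 'service']):
--         return 'product'
--     elif any(term in url_lower or term in alt_lower for term in ['team', 'staff', 'employee', 'people']):
--         return 'team'
--     elif any(term in url_lower or term in alt_lower for term in ['office', 'building', 'facility']):
--         return 'location'
--     elif any(term in url_lower or term in alt_lower for term in ['hero', 'banner', 'main']):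
--         return 'hero'
--     else:
--         return 'general'
-- ===== SOURCE B (Python) =====
-- # Flat term->rank map; minimum matching rank indexes the category list.
-- _TERM_RANK = {
--     'product': 0, 'service': 0,
--     'team': 1, 'staff': 1, 'employee': 1, 'people': 1,
--     'office': 2, 'building': 2, 'facility': 2,
--     'hero': 3, 'banner': 3, 'main': 3,
-- }
-- _CATEGORIES = ['product', 'team', 'location', 'hero', 'general']
--
-- def _categorize_image(url, alt_text, img_element):
--     u = url.lower()
--     a = alt_text.lower()
--     rank = 4
--     for term, r in _TERM_RANK.items():
--         if (term in u or term in a) and r < rank: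
--             rank = r
--     return _CATEGORIES[rank]
-- ===== Notes on version B (the rewrite author's own statement) =====
-- stated objective: alternative
-- what changed: Instead of staged group checks with early return, B flattens all keywords into one term-to-rank map, does a single pass computing the minimum rank among matching terms, and indexes a category list with it.
import Mathlib
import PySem

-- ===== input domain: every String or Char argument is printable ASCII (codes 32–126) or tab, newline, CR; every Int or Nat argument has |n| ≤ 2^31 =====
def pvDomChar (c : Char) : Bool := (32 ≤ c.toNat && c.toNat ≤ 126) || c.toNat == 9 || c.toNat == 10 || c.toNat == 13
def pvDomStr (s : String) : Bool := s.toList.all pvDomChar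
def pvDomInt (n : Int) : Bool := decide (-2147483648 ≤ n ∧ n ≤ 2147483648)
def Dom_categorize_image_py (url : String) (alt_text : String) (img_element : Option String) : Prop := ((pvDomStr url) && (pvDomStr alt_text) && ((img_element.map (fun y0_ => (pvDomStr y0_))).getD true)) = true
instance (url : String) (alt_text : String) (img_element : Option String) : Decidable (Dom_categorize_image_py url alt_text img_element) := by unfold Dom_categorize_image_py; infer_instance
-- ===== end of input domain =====

-- B replaces A's staged group checks with early return by one flat pass over a term→rank map
-- keeping the minimum matching rank, then indexing a category list; same cost, different algorithm.

-- ===== PORT A =====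
def categorize_image_py (url : String) (alt_text : String) (img_element : Option String) : String :=
  let url_lower := PySem.Str.lower url
  let alt_lower := PySem.Str.lower alt_text
  if (["product", "service"].any (fun term => PySem.Str.isIn term url_lower || PySem.Str.isIn term alt_lower)) then
    "product"
  else if (["team", "staff", "employee", "people"].any (fun term => PySem.Str.isIn term url_lower || PySem.Str.isIn term alt_lower)) then
    "team"
  else if (["office", "building", "facility"].any (fun term => PySem.Str.isIn term url_lower || PySem.Str.isIn term alt_lower)) then
    "location"
  else if (["hero", "banner", "main"].any (fun term => PySem.Str.isIn term url_lower || PySem.Str.isIn term alt_lower)) then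
    "hero"
  else
    "general"

-- ===== PORT B =====
def pvTermRank : List (String × Int) :=
  [ ("product", 0), ("service", 0)
  , ("team", 1), ("staff", 1), ("employee", 1), ("people", 1)
  , ("office", 2), ("building", 2), ("facility", 2)
  , ("hero", 3), ("banner", 3), ("main", 3) ]

def pvCategories : List String := ["product", "team", "location", "hero", "general"]

def categorize_image_py_alt (url : String) (alt_text : String) (img_element : Option String) : String :=
  let u := PySem.Str.lower url
  let a := PySem.Str.lower alt_text
  let rank : Int := pvTermRank.foldl
    (fun rank tr =>
      if (PySem.Str.isIn tr.1 u || PySem.Str.isIn tr.1 a) && decide (tr.2 < rank) then tr.2 else rank)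
    4
  (PySem.List.pyGet? pvCategories rank).getD ""   -- rank is always 0..4, so the index never fails

-- ===== PRECONDITION & SPEC =====
def Spec_categorize_image_py (url : String) (alt_text : String) (img_element : Option String) (out : String) : Prop := out = categorize_image_py_alt url alt_text img_element
instance (url : String) (alt_text : String) (img_element : Option String) (out : String) : Decidable (Spec_categorize_image_py url alt_text img_element out) := by unfold Spec_categorize_image_py; infer_instance

-- ===== CLAIM (what is proved, stated in full; the proofs are below) =====
def Claim_equal_categorize_image_py : Prop := ∀ (url : String) (alt_text : String) (img_element : Option String), Dom_categorize_image_py url alt_text img_element → Spec_categorize_image_py url alt_text img_element (categorize_image_py url alt_text img_element)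

-- ===== LEMMAS AND PROOFS =====

-- the min-rank fold over the twelve match booleans equals the first-group selector
theorem pv_fold_min : ∀ (b1 b2 b3 b4 b5 b6 b7 b8 b9 b10 b11 b12 : Bool),
    ([(b1, (0:Int)), (b2, 0), (b3, 1), (b4, 1), (b5, 1), (b6, 1),
      (b7, 2), (b8, 2), (b9, 2), (b10, 3), (b11, 3), (b12, 3)].foldl
      (fun rank p => if p.1 && decide (p.2 < rank) then p.2 else rank) 4)
    = (if b1 || b2 then 0 else if b3 || (b4 || (b5 || b6)) then 1
       else if b7 || (b8 || b9) then 2 else if b10 || (b11 || b12) then 3 else 4) := by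
  decide

-- B's fold over the term table, rewritten through List.foldl_map and pv_fold_min
theorem pv_fold_eq (u a : String) :
    (pvTermRank.foldl
      (fun rank tr => if (PySem.Str.isIn tr.1 u || PySem.Str.isIn tr.1 a) && decide (tr.2 < rank)
                      then tr.2 else rank) 4)
    = (if (PySem.Str.isIn "product" u || PySem.Str.isIn "product" a)
          || (PySem.Str.isIn "service" u || PySem.Str.isIn "service" a) then 0
       else if (PySem.Str.isIn "team" u || PySem.Str.isIn "team" a)
          || ((PySem.Str.isIn "staff" u || PySem.Str.isIn "staff" a)
          || ((PySem.Str.isIn "employee" u || PySem.Str.isIn "employee" a)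
          || (PySem.Str.isIn "people" u || PySem.Str.isIn "people" a))) then 1
       else if (PySem.Str.isIn "office" u || PySem.Str.isIn "office" a)
          || ((PySem.Str.isIn "building" u || PySem.Str.isIn "building" a)
          || (PySem.Str.isIn "facility" u || PySem.Str.isIn "facility" a)) then 2
       else if (PySem.Str.isIn "hero" u || PySem.Str.isIn "hero" a)
          || ((PySem.Str.isIn "banner" u || PySem.Str.isIn "banner" a)
          || (PySem.Str.isIn "main" u || PySem.Str.isIn "main" a)) then 3 else 4) :=
  calc
    (pvTermRank.foldl
      (fun rank tr => if (PySem.Str.isIn tr.1 u || PySem.Str.isIn tr.1 a) && decide (tr.2 < rank)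
                      then tr.2 else rank) 4)
        = ((pvTermRank.map
              (fun tr : String × Int => ((PySem.Str.isIn tr.1 u || PySem.Str.isIn tr.1 a), tr.2))).foldl
            (fun rank (p : Bool × Int) => if p.1 && decide (p.2 < rank) then p.2 else rank) 4) :=
      (@List.foldl_map _ _ _
        (fun tr : String × Int => ((PySem.Str.isIn tr.1 u || PySem.Str.isIn tr.1 a), tr.2))
        (fun rank (p : Bool × Int) => if p.1 && decide (p.2 < rank) then p.2 else rank)
        pvTermRank 4).symm
    _ = _ := by
      simp only [pvTermRank, List.map_cons, List.map_nil]
      exact pv_fold_min _ _ _ _ _ _ _ _ _ _ _ _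

-- indexing the category list by the selector equals A's if/elif chain
theorem pv_get_chain (g1 g2 g3 g4 : Bool) :
    (if g1 then "product" else if g2 then "team" else if g3 then "location"
     else if g4 then "hero" else "general")
    = (PySem.List.pyGet? ["product", "team", "location", "hero", "general"]
        (if g1 then 0 else if g2 then 1 else if g3 then 2 else if g4 then 3 else 4)).getD "" := by
  cases g1 <;> cases g2 <;> cases g3 <;> cases g4 <;> rfl

-- ===== VERDICT (by name: the statement is the Claim_ definition above) =====
theorem categorize_image_py_spec : Claim_equal_categorize_image_py := by
  intro url alt_text img_element _
  unfold Spec_categorize_image_py categorize_image_py categorize_image_py_alt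
  dsimp only
  rw [pv_fold_eq]
  simp only [List.any_cons, List.any_nil, Bool.or_false]
  exact pv_get_chain _ _ _ _
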